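-- pv_equiv track=rewrite | github.com/RotlevB/Backgamon_AI_Player | Huristic_AI_Player.py | heuristic_function
-- ===== SOURCE A (Python) =====
-- def heuristic_function(color, _pieces, other_pieces):
--     """
--     Evaluate the board state and return a heuristic score.
--
--     Args:
--         color (str): The player's color ("white" or "black").
--         _pieces (list): A 15-length list of the player's piece positions.
--         other_pieces (list): A 15-length list of the opponent's piece positions.
--
--     Returns:
--         float: A heuristic score for the current board state.
--     """
--     # Define scoring weights
--     WEIGHTS = {
--         "piece_safety": 10,
--         "board_control": 5,
--         "race_progress": 3,
--         "captured_pieces": -15,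
--         "escaped_pieces": 10,
--     }
--
--     # Identify home and escape indices
--     home_index = 0 if color == "black" else 25
--     escape_index = 25 if color == "black" else 0
--
--     # Initialize scores
--     piece_safety_score = 0
--     board_control_score = 0
--     race_progress_score = 0
--     captured_pieces_score = 0
--     escaped_pieces_score = 0
--
--     # Calculate piece safety and board control
--     position_counts = [0] * 26
--     for piece in _pieces:
--         position_counts[piece] += 1
--
--     for idx, count in enumerate(position_counts):
--         if count == 1:  # Blot
--             piece_safety_score -= 1
--         elif count > 1:  # Safe point
--             piece_safety_score += 1
--             board_control_score += 1  # More checkers = stronger control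
--
--     # Calculate race progress
--     for piece in _pieces:
--         if piece not in [home_index, escape_index]:  # Not captured or escaped
--             race_progress_score += (escape_index - piece if color == "white" else piece - home_index)
--
--     # Calculate penalties for captured pieces
--     captured_pieces_score = -_pieces.count(home_index) * WEIGHTS["captured_pieces"]
--
--     # Calculate rewards for escaped pieces
--     escaped_pieces_score = _pieces.count(escape_index) * WEIGHTS["escaped_pieces"]
--
--     # Combine all scores
--     total_score = (
--             WEIGHTS["piece_safety"] * piece_safety_score +
--             WEIGHTS["board_control"] * board_control_score +
--             WEIGHTS["race_progress"] * race_progress_score +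
--             captured_pieces_score +
--             escaped_pieces_score
--     )
--
--     return total_score
-- ===== SOURCE B (Python) =====
-- def heuristic_function(color, _pieces, other_pieces):
--     home = 0 if color == "black" else 25
--     esc = 25 if color == "black" else 0
--     counts = [0] * 26
--     for p in _pieces:
--         counts[p] += 1
--     safety = sum(1 if c > 1 else -1 for c in counts if c)
--     control = sum(1 for c in counts if c > 1)
--     ch = _pieces.count(home)
--     ce = _pieces.count(esc)
--     mid = len(_pieces) - ch - ce
--     smid = sum(_pieces) - home * ch - esc * ce
--     race = esc * mid - smid if color == "white" else smid - home * mid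
--     return 10 * safety + 5 * control + 3 * race + 15 * ch + 10 * ce
-- ===== Notes on version B (the rewrite author's own statement) =====
-- stated objective: alternative
-- what changed: A's per-piece race-progress loop and the two-counter blot/safe-point loop are replaced by closed-form arithmetic on sum/len/count aggregates plus two filtered sums over the count table; only the table build remains a loop.
import Mathlib
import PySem

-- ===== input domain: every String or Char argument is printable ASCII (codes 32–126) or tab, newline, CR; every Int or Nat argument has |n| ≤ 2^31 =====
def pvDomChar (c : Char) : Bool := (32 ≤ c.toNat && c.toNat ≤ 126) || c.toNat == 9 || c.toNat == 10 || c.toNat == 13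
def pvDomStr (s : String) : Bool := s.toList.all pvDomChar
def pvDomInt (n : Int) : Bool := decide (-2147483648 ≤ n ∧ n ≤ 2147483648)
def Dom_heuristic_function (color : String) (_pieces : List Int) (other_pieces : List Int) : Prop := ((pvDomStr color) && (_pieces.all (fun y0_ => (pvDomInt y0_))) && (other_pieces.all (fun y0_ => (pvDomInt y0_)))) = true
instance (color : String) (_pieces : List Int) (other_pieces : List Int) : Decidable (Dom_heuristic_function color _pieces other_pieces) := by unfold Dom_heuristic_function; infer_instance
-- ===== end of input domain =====

-- B replaces A's per-piece race loop and paired safety/control counters by closed-form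
-- aggregate arithmetic (sum/len/count) and two filtered sums over the count table.


-- ===== PORT A =====
def heuristic_function (color : String) (_pieces : List Int) (other_pieces : List Int) : Int :=
  let home_index : Int := if color == "black" then 0 else 25
  let escape_index : Int := if color == "black" then 25 else 0
  -- position_counts built by `position_counts[piece] += 1` (Python negative-index semantics)
  let position_counts : List Int :=
    _pieces.foldl (fun cnts p => PySem.List.pySetD cnts p (PySem.List.pyGetD cnts p 0 + 1))
      (List.replicate 26 (0 : Int))
  -- for idx, count in enumerate(position_counts): … (idx unused)
  let sc : Int × Int :=
    position_counts.foldl (fun (s : Int × Int) count =>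
      if count = 1 then (s.1 - 1, s.2)
      else if count > 1 then (s.1 + 1, s.2 + 1)
      else s) (0, 0)
  -- race-progress loop
  let race_progress_score : Int :=
    _pieces.foldl (fun acc p =>
      if ¬ (p = home_index ∨ p = escape_index) then
        acc + (if color == "white" then escape_index - p else p - home_index)
      else acc) 0
  let captured_pieces_score : Int := -(_pieces.count home_index : Int) * (-15)
  let escaped_pieces_score : Int := (_pieces.count escape_index : Int) * 10
  10 * sc.1 + 5 * sc.2 + 3 * race_progress_score + captured_pieces_score + escaped_pieces_score

-- ===== PORT B =====
def heuristic_function_alt (color : String) (_pieces : List Int) (other_pieces : List Int) : Int :=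
  let home : Int := if color == "black" then 0 else 25
  let esc : Int := if color == "black" then 25 else 0
  let counts : List Int :=
    _pieces.foldl (fun cnts p => PySem.List.pySetD cnts p (PySem.List.pyGetD cnts p 0 + 1))
      (List.replicate 26 (0 : Int))
  let safety : Int :=
    ((counts.filter (fun c => !(c == 0))).map (fun c => if c > 1 then (1 : Int) else -1)).sum
  let control : Int := ((counts.filter (fun c => 1 < c)).map (fun _ => (1 : Int))).sum
  let ch : Int := (_pieces.count home : Int)
  let ce : Int := (_pieces.count esc : Int)
  let mid : Int := (_pieces.length : Int) - ch - ce
  let smid : Int := _pieces.sum - home * ch - esc * ce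
  let race : Int := if color == "white" then esc * mid - smid else smid - home * mid
  10 * safety + 5 * control + 3 * race + 15 * ch + 10 * ce

-- ===== PRECONDITION & SPEC =====
-- A raises IndexError when some piece is outside Python's valid index range for the
-- 26-slot table; Pre_ excludes exactly those inputs.
def Pre_heuristic_function (color : String) (_pieces : List Int) (other_pieces : List Int) : Prop :=
  ∀ p ∈ _pieces, -26 ≤ p ∧ p < 26
instance (color : String) (_pieces : List Int) (other_pieces : List Int) : Decidable (Pre_heuristic_function color _pieces other_pieces) := by unfold Pre_heuristic_function; infer_instance

def pvWitness_heuristic_function : String × List Int × List Int := ("white", [0, 5, 5, 24, 25], [3])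

def Spec_heuristic_function (color : String) (_pieces : List Int) (other_pieces : List Int) (out : Int) : Prop := out = heuristic_function_alt color _pieces other_pieces
instance (color : String) (_pieces : List Int) (other_pieces : List Int) (out : Int) : Decidable (Spec_heuristic_function color _pieces other_pieces out) := by unfold Spec_heuristic_function; infer_instance

-- ===== CLAIM (what is proved, stated in full; the proofs are below) =====
def Claim_equal_heuristic_function : Prop := ∀ (color : String) (_pieces : List Int) (other_pieces : List Int), Dom_heuristic_function color _pieces other_pieces → Pre_heuristic_function color _pieces other_pieces → Spec_heuristic_function color _pieces other_pieces (heuristic_function color _pieces other_pieces)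

-- ===== LEMMAS AND PROOFS =====

-- Every entry of the incrementally built count table is nonnegative.
lemma counts_nonneg (l : List Int) (cnts : List Int) (h : ∀ x ∈ cnts, 0 ≤ x) :
    ∀ x ∈ l.foldl (fun cnts p => PySem.List.pySetD cnts p (PySem.List.pyGetD cnts p 0 + 1)) cnts,
      0 ≤ x := by
  induction l generalizing cnts with
  | nil => simpa
  | cons a l ih =>
    rw [List.foldl_cons]
    apply ih
    intro x hx
    have hv : 0 ≤ PySem.List.pyGetD cnts a 0 + 1 := by
      have hd : PySem.List.pyGetD cnts a 0 = (PySem.List.pyGet? cnts a).getD 0 := rfl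
      rw [hd]
      cases hg : PySem.List.pyGet? cnts a with
      | none => simp
      | some y =>
        have hy : y ∈ cnts := PySem.List.mem_of_pyGet?_eq_some cnts hg
        have := h y hy
        simp only [Option.getD_some]
        omega
    simp only [PySem.List.pySetD, PySem.List.pySet?] at hx
    cases hi : PySem.List.pyIdx? cnts.length a with
    | none => rw [hi] at hx; simp only [Option.map_none, Option.getD_none] at hx; exact h x hx
    | some k =>
      rw [hi] at hx
      simp only [Option.map_some, Option.getD_some] at hx
      rcases List.mem_or_eq_of_mem_set hx with h1 | h1
      · exact h x h1
      · exact h1 ▸ hv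

-- A's single enumerate pass with two counters equals B's two filtered sums
-- (over a table of nonnegative counts).
lemma sc_fold (l : List Int) (hpos : ∀ x ∈ l, 0 ≤ x) (s c : Int) :
    l.foldl (fun (ac : Int × Int) count =>
      if count = 1 then (ac.1 - 1, ac.2)
      else if count > 1 then (ac.1 + 1, ac.2 + 1)
      else ac) (s, c)
    = (s + ((l.filter (fun c => !(c == 0))).map (fun c => if c > 1 then (1 : Int) else -1)).sum,
       c + ((l.filter (fun c => 1 < c)).map (fun _ => (1 : Int))).sum) := by
  induction l generalizing s c with
  | nil => simp
  | cons a l ih =>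
    have hpa : 0 ≤ a := hpos a List.mem_cons_self
    have hpl : ∀ x ∈ l, 0 ≤ x := fun x hx => hpos x (List.mem_cons_of_mem a hx)
    simp only [List.foldl_cons, List.filter_cons]
    by_cases h1 : a = 1
    · rw [if_pos h1, ih hpl,
        if_pos (show (!(a == 0)) = true by simp [h1]),
        if_neg (show ¬((decide (1 < a)) = true) by simp [h1])]
      simp only [List.map_cons, List.sum_cons, if_neg (show ¬(1 < a) by omega), Prod.mk.injEq]
      exact ⟨by ring, trivial⟩
    · by_cases h2 : a > 1
      · rw [if_neg h1, if_pos h2, ih hpl,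
          if_pos (show (!(a == 0)) = true by simp; omega),
          if_pos (show (decide (1 < a)) = true by simp [h2])]
        simp only [List.map_cons, List.sum_cons, if_pos h2, Prod.mk.injEq]
        constructor <;> first | rfl | ring
      · have hz : a = 0 := by omega
        rw [if_neg h1, if_neg h2, ih hpl,
          if_neg (show ¬((!(a == 0)) = true) by simp [hz]),
          if_neg (show ¬((decide (1 < a)) = true) by simp [hz])]

-- A's race-progress loop in closed form over sum / length / counts.
lemma race_fold (home esc : Int) (hne : home ≠ esc) (w : Bool) (l : List Int) (acc : Int) :
    l.foldl (fun acc p => if ¬ (p = home ∨ p = esc) then acc + (if w then esc - p else p - home) else acc) acc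
    = acc + (if w then
        esc * ((l.length : Int) - l.count home - l.count esc)
          - (l.sum - home * (l.count home : Int) - esc * (l.count esc : Int))
      else (l.sum - home * (l.count home : Int) - esc * (l.count esc : Int))
          - home * ((l.length : Int) - l.count home - l.count esc)) := by
  induction l generalizing acc with
  | nil => simp
  | cons a l ih =>
    rw [List.foldl_cons, ih]
    by_cases hh : a = home
    · have he : ¬ a = esc := fun h => hne (hh ▸ h)
      rw [if_neg (by tauto)]
      simp only [List.count_cons, List.sum_cons, List.length_cons, hh, beq_iff_eq, hne,
        beq_self_eq_true, if_true, if_false]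
      cases w <;> · simp only [if_true, if_false, Bool.false_eq_true]; push_cast; ring
    · by_cases he : a = esc
      · rw [if_neg (by tauto)]
        simp only [List.count_cons, List.sum_cons, List.length_cons, he, beq_iff_eq,
          Ne.symm hne, beq_self_eq_true, if_true, if_false]
        cases w <;> · simp only [if_true, if_false, Bool.false_eq_true]; push_cast; ring
      · rw [if_pos (by tauto)]
        simp only [List.count_cons, List.sum_cons, List.length_cons, beq_iff_eq, hh, he,
          if_false]
        cases w <;> · simp only [if_true, if_false, Bool.false_eq_true]; push_cast; ring

-- ===== VERDICT (by name: the statement is the Claim_ definition above) =====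
theorem heuristic_function_spec : Claim_equal_heuristic_function := by
  intro color _pieces other_pieces _ _
  unfold Spec_heuristic_function heuristic_function heuristic_function_alt
  simp only []
  rw [sc_fold _ (counts_nonneg _ _ (by intro x hx; simp at hx; omega)),
    race_fold _ _ (by cases h : color == "black" <;> simp) (color == "white")]
  by_cases hb : (color == "black") = true
  · simp only [hb, if_true]
    have hw : (color == "white") = false := by
      cases h : color == "white"
      · rfl
      · exact absurd (eq_of_beq hb ▸ eq_of_beq h) (by decide)
    simp only [hw, Bool.false_eq_true, if_false]
    push_cast; ring
  · simp only [Bool.not_eq_true] at hb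
    simp only [hb, Bool.false_eq_true, if_false]
    by_cases hw : (color == "white") = true
    · simp only [hw, if_true]; push_cast; ring
    · simp only [Bool.not_eq_true] at hw
      simp only [hw, Bool.false_eq_true, if_false]
      push_cast; ring
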